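-- pv_equiv track=rewrite | github.com/FlorianPfaff/bayescatrack | src/bayescatrack/experiments/track2p_roi_index_audit.py | _fieldnames
-- ===== SOURCE A (Python) =====
-- from collections.abc import Sequence
--
-- def _fieldnames(rows: Sequence[dict[str, int | str | bool | None]]) -> list[str]:
--     preferred = [
--         "subject",
--         "session",
--         "session_index",
--         "reference_source",
--         "n_stat_rows",
--         "n_loaded_rois",
--         "n_loaded_cells",
--         "n_loaded_rois_with_non_cells",
--         "n_gt_rois",
--         "max_gt_roi_index",
--         "n_gt_rois_missing_from_loaded_indices",
--         "n_gt_rois_missing_with_include_non_cells",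
--         "missing_gt_roi_examples",
--         "include_non_cells_resolves_mismatch",
--         "gt_fits_loaded_indices",
--         "gt_fits_loaded_cell_indices",
--         "gt_fits_include_non_cells_indices",
--         "gt_fits_raw_stat_row_space",
--         "gt_fits_filtered_cell_ordinal_space",
--         "gt_index_space",
--         "compatible",
--     ]
--     extra = sorted({key for row in rows for key in row} - set(preferred))
--     return [key for key in preferred if any(key in row for row in rows)] + extra
-- ===== SOURCE B (Python) =====
-- from collections.abc import Sequence
--
-- def _fieldnames(rows: Sequence[dict[str, int | str | bool | None]]) -> list[str]:
--     preferred = [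
--         "subject",
--         "session",
--         "session_index",
--         "reference_source",
--         "n_stat_rows",
--         "n_loaded_rois",
--         "n_loaded_cells",
--         "n_loaded_rois_with_non_cells",
--         "n_gt_rois",
--         "max_gt_roi_index",
--         "n_gt_rois_missing_from_loaded_indices",
--         "n_gt_rois_missing_with_include_non_cells",
--         "missing_gt_roi_examples",
--         "include_non_cells_resolves_mismatch",
--         "gt_fits_loaded_indices",
--         "gt_fits_loaded_cell_indices",
--         "gt_fits_include_non_cells_indices",
--         "gt_fits_raw_stat_row_space",
--         "gt_fits_filtered_cell_ordinal_space",
--         "gt_index_space",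
--         "compatible",
--     ]
--     rank = {name: i for i, name in enumerate(preferred)}
--     keys = {k for row in rows for k in row}
--     sentinel = len(preferred)
--     return sorted(keys, key=lambda k: (rank.get(k, sentinel), k))
-- ===== Notes on version B (the rewrite author's own statement) =====
-- stated objective: alternative
-- what changed: A builds the output in two passes (filter the preferred list by an any-probe over all rows, then append the sorted set difference of extras); B builds a rank table from the preferred list and the union of all row keys once, then produces the entire output with a single sort under the lexicographic key (rank.get(k, sentinel), k).
import Mathlib
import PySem

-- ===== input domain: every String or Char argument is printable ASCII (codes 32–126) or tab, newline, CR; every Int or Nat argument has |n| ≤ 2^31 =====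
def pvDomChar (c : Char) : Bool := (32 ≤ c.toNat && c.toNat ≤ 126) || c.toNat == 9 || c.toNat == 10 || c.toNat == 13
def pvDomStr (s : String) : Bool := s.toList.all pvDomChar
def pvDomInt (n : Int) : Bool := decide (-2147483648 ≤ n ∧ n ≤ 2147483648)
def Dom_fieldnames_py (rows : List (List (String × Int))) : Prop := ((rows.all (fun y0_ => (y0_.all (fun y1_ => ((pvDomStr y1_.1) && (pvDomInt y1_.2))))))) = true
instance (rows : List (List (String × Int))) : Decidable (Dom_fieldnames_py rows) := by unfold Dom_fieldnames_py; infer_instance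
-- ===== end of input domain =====

-- B replaces A's two output passes (preferred-list scan with an `any` probe per name, plus a
-- separate sorted set difference) by a rank table and ONE sort of the key union under the
-- lexicographic key (rank, name); objective: alternative decomposition, same asymptotic cost.

-- ===== PORT A =====
-- the shared literal `preferred` list of A (and B)
def pvPreferred : List String := [
  "subject",
  "session",
  "session_index",
  "reference_source",
  "n_stat_rows",
  "n_loaded_rois",
  "n_loaded_cells",
  "n_loaded_rois_with_non_cells",
  "n_gt_rois",
  "max_gt_roi_index",
  "n_gt_rois_missing_from_loaded_indices",
  "n_gt_rois_missing_with_include_non_cells",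
  "missing_gt_roi_examples",
  "include_non_cells_resolves_mismatch",
  "gt_fits_loaded_indices",
  "gt_fits_loaded_cell_indices",
  "gt_fits_include_non_cells_indices",
  "gt_fits_raw_stat_row_space",
  "gt_fits_filtered_cell_ordinal_space",
  "gt_index_space",
  "compatible",
  ]

def fieldnames_py (rows : List (List (String × Int))) : List String :=
  let preferred := pvPreferred
  -- extra = sorted({key for row in rows for key in row} - set(preferred))
  let extra := PySem.List.sorted
      (PySem.Set.diff (PySem.Set.ofList (rows.flatMap (fun row => row.map Prod.fst)))
        (PySem.Set.ofList preferred))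
      (fun k => k) false
  -- [key for key in preferred if any(key in row for row in rows)] + extra
  -- (`key in row` = dict key membership, exact as row.any on the association list's keys)
  (preferred.filter (fun key => rows.any (fun row => row.any (fun p => p.1 == key)))) ++ extra

-- ===== PORT B =====
-- rank = {name: i for i, name in enumerate(preferred)}
def pvRankD : PySem.Dict String Int :=
  PySem.Dict.ofList ((PySem.List.enumerate pvPreferred).map (fun p => (p.2, p.1)))

def fieldnames_py_alt (rows : List (List (String × Int))) : List String :=
  let preferred := pvPreferred
  let rank := pvRankD
  -- keys = {k for row in rows for k in row}
  let keys := PySem.Set.ofList (rows.flatMap (fun row => row.map Prod.fst))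
  let sentinel : Int := (preferred.length : Int)
  -- sorted(keys, key=lambda k: (rank.get(k, sentinel), k))
  PySem.List.sorted2 keys (fun k => PySem.Dict.getD rank k sentinel) (fun k => k) false

-- ===== PRECONDITION & SPEC =====
def Spec_fieldnames_py (rows : List (List (String × Int))) (out : List String) : Prop := out = fieldnames_py_alt rows
instance (rows : List (List (String × Int))) (out : List String) : Decidable (Spec_fieldnames_py rows out) := by unfold Spec_fieldnames_py; infer_instance

-- ===== CLAIM (what is proved, stated in full; the proofs are below) =====
def Claim_equal_fieldnames_py : Prop := ∀ (rows : List (List (String × Int))), Dom_fieldnames_py rows → Spec_fieldnames_py rows (fieldnames_py rows)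

-- ===== LEMMAS AND PROOFS =====

-- B's rank lookup, as a plain function on strings
def pvRk (k : String) : Int := PySem.Dict.getD pvRankD k (pvPreferred.length : Int)

-- the single sort key of B, lexicographic (rank, name)
def pvKey (k : String) : Lex (Int × String) := toLex (pvRk k, k)

theorem pvRk_not_mem {k : String} (h : k ∉ pvPreferred) : pvRk k = (pvPreferred.length : Int) := by
  have hfind : List.find? (fun p => p.1 == k) (PySem.Dict.items pvRankD) = none := by
    rw [List.find?_eq_none]
    intro p hp
    have hp1 : p.1 ∈ pvPreferred := by
      have hall : ∀ q ∈ PySem.Dict.items pvRankD, q.1 ∈ pvPreferred := by decide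
      exact hall p hp
    simp only [beq_iff_eq]
    exact fun e => h (e ▸ hp1)
  simp [pvRk, PySem.Dict.getD, PySem.Dict.get?, hfind]

theorem pvRk_lt_of_mem : ∀ k ∈ pvPreferred, pvRk k < (pvPreferred.length : Int) := by decide

theorem pvPreferred_pairwise : pvPreferred.Pairwise (fun a b => pvRk a < pvRk b) := by decide

theorem pvPreferred_nodup : pvPreferred.Nodup := by decide

-- sorted2 with an Int first key and String second key is sorted under the lexicographic pair key
theorem sorted2_eq_sorted_lex {α : Type} (xs : List α) (k1 : α → Int) (k2 : α → String) :
    PySem.List.sorted2 xs k1 k2 false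
      = PySem.List.sorted xs (fun x => toLex (k1 x, k2 x)) false := by
  have hcmp : (fun a b : α => decide (k1 a < k1 b) || (!decide (k1 b < k1 a) && decide (k2 a < k2 b)))
      = (fun a b : α => decide (toLex (k1 a, k2 a) < toLex (k1 b, k2 b))) := by
    funext a b
    rcases lt_trichotomy (k1 a) (k1 b) with h | h | h
    · simp [Prod.Lex.lt_iff, h]
    · simp [Prod.Lex.lt_iff, h]
    · simp [Prod.Lex.lt_iff, h, lt_asymm h, (ne_of_gt h)]
  rw [PySem.List.sorted_eq_foldl_insertBy]
  simp only [PySem.List.sorted2, hcmp]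
  rfl

theorem present_iff (rows : List (List (String × Int))) (k : String) :
    rows.any (fun row => row.any (fun p => p.1 == k)) = true
      ↔ k ∈ rows.flatMap (fun row => row.map Prod.fst) := by
  simp [List.any_eq_true, List.mem_flatMap, List.mem_map]

theorem fieldnames_eq (rows : List (List (String × Int))) :
    fieldnames_py rows = fieldnames_py_alt rows := by
  unfold fieldnames_py fieldnames_py_alt
  simp only []
  rw [sorted2_eq_sorted_lex]
  set ks := rows.flatMap (fun row => row.map Prod.fst) with hks
  set K := PySem.Set.ofList ks with hK
  set P := pvPreferred.filter (fun key => rows.any (fun row => row.any (fun p => p.1 == key))) with hP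
  set E := PySem.List.sorted (PySem.Set.diff K (PySem.Set.ofList pvPreferred)) (fun k => k) false with hE
  have hKnodup : K.Nodup := PySem.Set.nodup_ofList ks
  have hKmem : ∀ x, x ∈ K ↔ x ∈ ks := fun x => PySem.Set.mem_ofList ks x
  -- membership facts
  have hEmem : ∀ y, y ∈ E → y ∈ K ∧ y ∉ pvPreferred := by
    intro y hy
    rw [hE, PySem.List.mem_sorted] at hy
    simp only [PySem.Set.diff, List.mem_filter, Bool.not_eq_eq_eq_not, Bool.not_true] at hy
    refine ⟨hy.1, fun hmem => ?_⟩
    have := (PySem.Set.contains_iff (PySem.Set.ofList pvPreferred) y).mpr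
      ((PySem.Set.mem_ofList pvPreferred y).mpr hmem)
    rw [hy.2] at this; exact absurd this (by simp)
  have hPmem : ∀ x, x ∈ P ↔ x ∈ pvPreferred ∧ x ∈ ks := by
    intro x
    rw [hP, List.mem_filter]
    exact and_congr_right fun _ => present_iff rows x
  -- permutation
  have hperm : (P ++ E).Perm K := by
    have h1 : E.Perm (K.filter (fun x => !(PySem.Set.ofList pvPreferred).contains x)) := by
      rw [hE]; exact PySem.List.sorted_perm _ _ _
    have h2 : P.Perm (K.filter (fun x => (PySem.Set.ofList pvPreferred).contains x)) := by
      rw [List.perm_ext_iff_of_nodup (List.Nodup.filter _ pvPreferred_nodup)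
        (List.Nodup.filter _ hKnodup)]
      intro a
      simp only [List.mem_filter, PySem.Set.contains_iff, PySem.Set.mem_ofList,
        hKmem a, present_iff rows a]
      tauto
    exact ((h2.append h1).trans (List.filter_append_perm _ K))
  -- pairwise strict increase of the key on P ++ E
  have hpair : (P ++ E).Pairwise (fun a b => pvKey a < pvKey b) := by
    rw [List.pairwise_append]
    refine ⟨?_, ?_, ?_⟩
    · exact List.Pairwise.sublist List.filter_sublist (pvPreferred_pairwise.imp
        (fun h => Prod.Lex.lt_iff.mpr (Or.inl h)))
    · have hle : E.Pairwise (fun a b => a ≤ b) := by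
        rw [hE]; exact PySem.List.sorted_pairwise _ _
      have hnd : E.Nodup := by
        have : E.Perm (PySem.Set.diff K (PySem.Set.ofList pvPreferred)) := by
          rw [hE]; exact PySem.List.sorted_perm _ _ _
        exact this.nodup_iff.mpr (List.Nodup.filter _ hKnodup)
      have hlt : E.Pairwise (fun a b => a < b) :=
        (hle.and hnd).imp (fun h => lt_of_le_of_ne h.1 h.2)
      refine hlt.imp_of_mem (fun ha hb h => ?_)
      have hra := pvRk_not_mem (hEmem _ ha).2
      have hrb := pvRk_not_mem (hEmem _ hb).2
      exact Prod.Lex.lt_iff.mpr (Or.inr ⟨by show pvRk _ = pvRk _; rw [hra, hrb], h⟩)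
    · intro a ha b hb
      have h1 : pvRk a < (pvPreferred.length : Int) :=
        pvRk_lt_of_mem a ((hPmem a).mp ha).1
      have h2 := pvRk_not_mem (hEmem b hb).2
      refine Prod.Lex.lt_iff.mpr (Or.inl ?_)
      show pvRk a < pvRk b
      rw [h2]; exact h1
  exact (PySem.List.sorted_eq_of_perm_of_pairwise_lt K (P ++ E) pvKey hperm hpair).symm

-- ===== VERDICT (by name: the statement is the Claim_ definition above) =====
theorem fieldnames_py_spec : Claim_equal_fieldnames_py := by
  intro rows _
  unfold Spec_fieldnames_py
  exact fieldnames_eq rows
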